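-- pv_equiv track=rewrite | github.com/RoopkumarD/aoc-2023 | day18/two.py | dug_according_instruction
-- ===== SOURCE A (Python) =====
-- from typing import Tuple
--
-- def dug_according_instruction(
--     instruction: Tuple[str, int, str], row_current: int, col_current: int
-- ):
--     new_edge_coordinates = set()
--
--     if instruction[0] == "D":
--         for j in range(instruction[1]):
--             row_current += 1
--             new_edge_coordinates.add((row_current, col_current))
--     elif instruction[0] == "L":
--         for j in range(instruction[1]):
--             col_current -= 1
--             new_edge_coordinates.add((row_current, col_current))
--     elif instruction[0] == "R":
--         for j in range(instruction[1]):
--             col_current += 1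
--             new_edge_coordinates.add((row_current, col_current))
--     elif instruction[0] == "U":
--         for j in range(instruction[1]):
--             row_current -= 1
--             new_edge_coordinates.add((row_current, col_current))
--
--     return new_edge_coordinates, row_current, col_current
-- ===== SOURCE B (Python) =====
-- DIR = {"U": (-1, 0), "D": (1, 0), "L": (0, -1), "R": (0, 1)}
--
--
-- def _segment(r, c, dr, dc, n):
--     """Cells at offsets 1..n from (r, c) along (dr, dc), by recursive bisection:
--     split the segment at its midpoint and recurse on the two halves."""
--     if n <= 0:
--         return []
--     if n == 1:
--         return [(r + dr, c + dc)]
--     h = n // 2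
--     return _segment(r, c, dr, dc, h) + _segment(r + dr * h, c + dc * h, dr, dc, n - h)
--
--
-- def dug_according_instruction(instruction, row_current, col_current):
--     delta = DIR.get(instruction[0])
--     if delta is None:
--         return set(), row_current, col_current
--     dr, dc = delta
--     steps = max(instruction[1], 0)
--     return (
--         set(_segment(row_current, col_current, dr, dc, steps)),
--         row_current + dr * steps,
--         col_current + dc * steps,
--     )
-- ===== Notes on version B (the rewrite author's own statement) =====
-- stated objective: alternative
-- what changed: Replaces A's linear step-by-step walk (mutating the coordinate once per cell in four per-direction loops) with a divide-and-conquer recursion that bisects the segment at its midpoint and concatenates the two recursively-built halves, computing the endpoint once by multiplication.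
import Mathlib
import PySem

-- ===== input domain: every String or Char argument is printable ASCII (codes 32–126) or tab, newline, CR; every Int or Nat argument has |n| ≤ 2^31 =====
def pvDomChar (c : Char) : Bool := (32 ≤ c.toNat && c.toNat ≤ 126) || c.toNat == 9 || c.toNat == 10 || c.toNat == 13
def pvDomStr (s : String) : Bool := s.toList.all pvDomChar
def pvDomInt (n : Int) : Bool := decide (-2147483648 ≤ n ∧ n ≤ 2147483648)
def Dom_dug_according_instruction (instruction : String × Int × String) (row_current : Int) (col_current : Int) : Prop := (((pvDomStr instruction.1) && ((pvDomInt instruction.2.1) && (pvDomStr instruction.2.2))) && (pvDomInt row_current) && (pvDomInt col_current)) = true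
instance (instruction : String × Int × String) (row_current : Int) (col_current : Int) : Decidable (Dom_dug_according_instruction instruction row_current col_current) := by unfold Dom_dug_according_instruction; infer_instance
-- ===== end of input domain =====

-- B replaces A's linear per-cell walk by a divide-and-conquer bisection of the segment (alternative algorithm; similar cost).


-- ===== PORT A =====
def dug_according_instruction (instruction : String × Int × String) (row_current : Int) (col_current : Int) : (List (Int × Int)) × Int × Int :=
  let new_edge_coordinates : PySem.Set (Int × Int) := PySem.Set.empty
  if instruction.1 == "D" then
    let st := (PySem.List.pyRange 0 instruction.2.1 1).foldl
      (fun (st : PySem.Set (Int × Int) × Int) _ =>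
        let row := st.2 + 1
        (PySem.Set.add st.1 (row, col_current), row)) (new_edge_coordinates, row_current)
    (st.1, st.2, col_current)
  else if instruction.1 == "L" then
    let st := (PySem.List.pyRange 0 instruction.2.1 1).foldl
      (fun (st : PySem.Set (Int × Int) × Int) _ =>
        let col := st.2 - 1
        (PySem.Set.add st.1 (row_current, col), col)) (new_edge_coordinates, col_current)
    (st.1, row_current, st.2)
  else if instruction.1 == "R" then
    let st := (PySem.List.pyRange 0 instruction.2.1 1).foldl
      (fun (st : PySem.Set (Int × Int) × Int) _ =>
        let col := st.2 + 1
        (PySem.Set.add st.1 (row_current, col), col)) (new_edge_coordinates, col_current)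
    (st.1, row_current, st.2)
  else if instruction.1 == "U" then
    let st := (PySem.List.pyRange 0 instruction.2.1 1).foldl
      (fun (st : PySem.Set (Int × Int) × Int) _ =>
        let row := st.2 - 1
        (PySem.Set.add st.1 (row, col_current), row)) (new_edge_coordinates, row_current)
    (st.1, st.2, col_current)
  else
    (new_edge_coordinates, row_current, col_current)

-- ===== PORT B =====
def pvDIR : PySem.Dict String (Int × Int) :=
  ((((PySem.Dict.empty).insert "U" (-1, 0)).insert "D" (1, 0)).insert "L" (0, -1)).insert "R" (0, 1)

-- cells at offsets 1..n from (r, c), built by bisecting the segment at its midpoint (port of Source B's _segment)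
def pvSegment (r c dr dc n : Int) : List (Int × Int) :=
  if _hle : n ≤ 0 then []
  else if _h1 : n = 1 then [(r + dr, c + dc)]
  else
    pvSegment r c dr dc (PySem.Int.floordiv n 2) ++
      pvSegment (r + dr * PySem.Int.floordiv n 2) (c + dc * PySem.Int.floordiv n 2) dr dc
        (n - PySem.Int.floordiv n 2)
termination_by n.toNat
decreasing_by
  · rw [PySem.Int.floordiv_eq_ediv_of_pos (by norm_num)]; omega
  · rw [PySem.Int.floordiv_eq_ediv_of_pos (by norm_num)]; omega

def dug_according_instruction_alt (instruction : String × Int × String) (row_current : Int) (col_current : Int) : (List (Int × Int)) × Int × Int :=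
  match pvDIR.get? instruction.1 with
  | none => (PySem.Set.empty, row_current, col_current)
  | some (dr, dc) =>
    let steps := max instruction.2.1 0
    (PySem.Set.ofList (pvSegment row_current col_current dr dc steps),
     row_current + dr * steps, col_current + dc * steps)

-- ===== PRECONDITION & SPEC =====
def Spec_dug_according_instruction (instruction : String × Int × String) (row_current : Int) (col_current : Int) (out : (List (Int × Int)) × Int × Int) : Prop := out = dug_according_instruction_alt instruction row_current col_current
instance (instruction : String × Int × String) (row_current : Int) (col_current : Int) (out : (List (Int × Int)) × Int × Int) : Decidable (Spec_dug_according_instruction instruction row_current col_current out) := by unfold Spec_dug_according_instruction; infer_instance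

-- ===== CLAIM (what is proved, stated in full; the proofs are below) =====
def Claim_equal_dug_according_instruction : Prop := ∀ (instruction : String × Int × String) (row_current : Int) (col_current : Int), Dom_dug_according_instruction instruction row_current col_current → Spec_dug_according_instruction instruction row_current col_current (dug_according_instruction instruction row_current col_current)

-- ===== LEMMAS AND PROOFS =====

-- A's loop shape: walking one step d at a time and adding g(position) equals the closed-form range map
lemma pv_loop_gen (g : Int → Int × Int) (d : Int) : ∀ (m : Nat) (x : Int),
    (PySem.List.pyRange 0 (m : Int) 1).foldl
      (fun (st : PySem.Set (Int × Int) × Int) _ =>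
        (PySem.Set.add st.1 (g (st.2 + d)), st.2 + d)) (([] : PySem.Set (Int × Int)), x)
    = (PySem.Set.ofList ((PySem.List.pyRange 1 ((m : Int) + 1) 1).map (fun k => g (x + d * k))),
       x + d * (m : Int)) := by
  intro m
  induction m with
  | zero =>
    intro x
    simp [PySem.List.pyRange_one_eq_nil, PySem.Set.ofList_nil]
  | succ m ih =>
    intro x
    have h1 : PySem.List.pyRange 0 ((m + 1 : Nat) : Int) 1
        = PySem.List.pyRange 0 (m : Int) 1 ++ [(m : Int)] := by
      push_cast
      exact PySem.List.pyRange_one_succ_right (by positivity)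
    have h2 : PySem.List.pyRange 1 (((m + 1 : Nat) : Int) + 1) 1
        = PySem.List.pyRange 1 ((m : Int) + 1) 1 ++ [(m : Int) + 1] := by
      push_cast
      have := PySem.List.pyRange_one_succ_right (a := 1) (b := (m : Int) + 1) (by omega)
      simpa using this
    rw [h1, h2, List.foldl_append, ih, List.map_append, List.map_cons, List.map_nil,
        PySem.Set.ofList_append_singleton]
    simp only [List.foldl_cons, List.foldl_nil]
    have e1 : x + d * (m : Int) + d = x + d * ((m : Int) + 1) := by ring
    rw [e1]
    norm_cast

-- reduce an arbitrary Int count n to the Nat max n 0 on the A side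
lemma pv_loop_int (g : Int → Int × Int) (d : Int) (n x : Int) :
    (PySem.List.pyRange 0 n 1).foldl
      (fun (st : PySem.Set (Int × Int) × Int) _ =>
        (PySem.Set.add st.1 (g (st.2 + d)), st.2 + d)) (([] : PySem.Set (Int × Int)), x)
    = (PySem.Set.ofList ((PySem.List.pyRange 1 (max n 0 + 1) 1).map (fun k => g (x + d * k))),
       x + d * max n 0) := by
  have hr : PySem.List.pyRange 0 n 1 = PySem.List.pyRange 0 ((max n 0).toNat : Int) 1 := by
    rcases le_or_gt n 0 with h | h
    · rw [PySem.List.pyRange_one_eq_nil h, PySem.List.pyRange_one_eq_nil (by omega)]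
    · congr 1; omega
  rw [hr, pv_loop_gen, show (((max n 0).toNat : Int)) = max n 0 from by omega]

-- range shift: pyRange (a+t) (b+t) = pyRange a b shifted by t
lemma pv_range_shift (a b t : Int) :
    PySem.List.pyRange (a + t) (b + t) 1 = (PySem.List.pyRange a b 1).map (fun k => k + t) := by
  rw [PySem.List.pyRange_one, PySem.List.pyRange_one, List.map_map,
      show b + t - (a + t) = b - a from by ring]
  apply List.map_congr_left
  intro j _
  simp only [Function.comp_apply]
  ring

-- B's bisection on a Nat count builds exactly the cells at offsets 1..m, in order
lemma pv_segment_eq_range (dr dc : Int) : ∀ (m : Nat) (r c : Int),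
    pvSegment r c dr dc (m : Int)
      = (PySem.List.pyRange 1 ((m : Int) + 1) 1).map (fun k => (r + dr * k, c + dc * k)) := by
  intro m
  induction m using Nat.strong_induction_on with
  | _ m ih =>
    intro r c
    match m with
    | 0 =>
      rw [pvSegment]
      norm_num [PySem.List.pyRange_one_eq_nil]
    | 1 =>
      rw [pvSegment]
      rw [show ((1 : Nat) : Int) + 1 = 1 + 1 from by norm_num, PySem.List.pyRange_one_singleton]
      norm_num
    | (k + 2) =>
      rw [pvSegment]
      have hpos : ¬ ((k + 2 : Nat) : Int) ≤ 0 := by push_cast; omega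
      have hne1 : ¬ ((k + 2 : Nat) : Int) = 1 := by push_cast; omega
      rw [dif_neg hpos, dif_neg hne1]
      have hfd : PySem.Int.floordiv ((k + 2 : Nat) : Int) 2 = (((k + 2) / 2 : Nat) : Int) := by
        rw [PySem.Int.floordiv_eq_ediv_of_pos (by norm_num)]
        omega
      set h : Nat := (k + 2) / 2 with hh
      have hle2 : h ≤ k + 2 := Nat.div_le_self _ _
      have ht : ((k + 2 : Nat) : Int) - (h : Int) = (((k + 2) - h : Nat) : Int) := by
        push_cast [hle2]; ring
      rw [hfd, ht, ih h (by omega), ih ((k + 2) - h) (by omega)]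
      have hsplit : PySem.List.pyRange 1 (((k + 2 : Nat) : Int) + 1) 1
          = PySem.List.pyRange 1 ((h : Int) + 1) 1
            ++ PySem.List.pyRange ((h : Int) + 1) (((k + 2 : Nat) : Int) + 1) 1 :=
        PySem.List.pyRange_one_append 1 ((h : Int) + 1) _ (by omega) (by push_cast; omega)
      rw [hsplit, List.map_append]
      congr 1
      have hshift : PySem.List.pyRange ((h : Int) + 1) (((k + 2 : Nat) : Int) + 1) 1
          = (PySem.List.pyRange 1 ((((k + 2) - h : Nat) : Int) + 1) 1).map (fun x => x + (h : Int)) := by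
        have := pv_range_shift 1 ((((k + 2) - h : Nat) : Int) + 1) (h : Int)
        rw [show (1 : Int) + (h : Int) = (h : Int) + 1 from by ring] at this
        rw [show (((k + 2) - h : Nat) : Int) + 1 + (h : Int) = ((k + 2 : Nat) : Int) + 1 from by push_cast [hle2]; ring] at this
        exact this
      rw [hshift, List.map_map]
      apply List.map_congr_left
      intro j _
      simp only [Function.comp_apply, Prod.mk.injEq]
      constructor <;> ring

-- B's bisection equals the closed-form range map, for an Int count clipped at 0
lemma pv_segment_eq (dr dc r c n : Int) :
    pvSegment r c dr dc (max n 0)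
      = (PySem.List.pyRange 1 (max n 0 + 1) 1).map (fun k => (r + dr * k, c + dc * k)) := by
  have hm : max n 0 = ((max n 0).toNat : Int) := by omega
  rw [hm]
  exact pv_segment_eq_range dr dc (max n 0).toNat r c

-- ===== VERDICT (by name: the statement is the Claim_ definition above) =====
theorem dug_according_instruction_spec : Claim_equal_dug_according_instruction := by
  intro instruction row_current col_current _
  unfold Spec_dug_according_instruction
  obtain ⟨s, n, color⟩ := instruction
  unfold dug_according_instruction dug_according_instruction_alt
  by_cases hD : s = "D"
  · subst hD
    have hget : pvDIR.get? "D" = some ((1 : Int), (0 : Int)) := by rfl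
    have h := pv_loop_int (fun x => (x, col_current)) 1 n row_current
    simp [hget]
    rw [h, pv_segment_eq]
    simp
  by_cases hL : s = "L"
  · subst hL
    have hget : pvDIR.get? "L" = some ((0 : Int), (-1 : Int)) := by rfl
    have h := pv_loop_int (fun x => (row_current, x)) (-1) n col_current
    simp only [sub_eq_add_neg]
    simp [hget]
    rw [h, pv_segment_eq]
    simp
  by_cases hR : s = "R"
  · subst hR
    have hget : pvDIR.get? "R" = some ((0 : Int), (1 : Int)) := by rfl
    have h := pv_loop_int (fun x => (row_current, x)) 1 n col_current
    simp [hget]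
    rw [h, pv_segment_eq]
    simp
  by_cases hU : s = "U"
  · subst hU
    have hget : pvDIR.get? "U" = some ((-1 : Int), (0 : Int)) := by rfl
    have h := pv_loop_int (fun x => (x, col_current)) (-1) n row_current
    simp only [sub_eq_add_neg]
    simp [hget]
    rw [h, pv_segment_eq]
    simp
  · have hn : pvDIR.get? s = none := by
      unfold pvDIR
      rw [PySem.Dict.get?_insert_of_ne _ _ hR, PySem.Dict.get?_insert_of_ne _ _ hL,
          PySem.Dict.get?_insert_of_ne _ _ hD, PySem.Dict.get?_insert_of_ne _ _ hU]
      rfl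
    simp [hn, hD, hL, hR, hU]
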